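-- pv_equiv track=rewrite | github.com/johnding1996/Slurm-vLLM | bench.py | shorten_model_name
-- ===== SOURCE A (Python) =====
-- def shorten_model_name(name):
--     """Shorten model name by taking first 4 chars of each part split by / or -"""
--     # First split by '/'
--     if "/" in name:
--         parts = name.split("/")
--         shortened_parts = []
--         for part in parts:
--             # Then split each part by '-' if needed
--             if "-" in part:
--                 subparts = part.split("-")
--                 shortened_subparts = [
--                     subpart[:4] if len(subpart) > 4 else subpart for subpart in subparts
--                 ]
--                 shortened_parts.append("-".join(shortened_subparts))
--             else:
--                 shortened_parts.append(part[:4] if len(part) > 4 else part)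
--         return "/".join(shortened_parts)
--
--     # If no '/', just split by '-'
--     elif "-" in name:
--         parts = name.split("-")
--         shortened_parts = [part[:4] if len(part) > 4 else part for part in parts]
--         return "-".join(shortened_parts)
--
--     # No separators
--     return name[:4] if len(name) > 4 else name
-- ===== SOURCE B (Python) =====
-- def shorten_model_name(name):
--     """Shorten model name by taking first 4 chars of each part split by / or -"""
--     out = []
--     run = 0
--     for ch in name:
--         if ch == "/" or ch == "-":
--             out.append(ch)
--             run = 0
--         else:
--             if run < 4:
--                 out.append(ch)
--             run += 1
--     return "".join(out)
-- ===== Notes on version B (the rewrite author's own statement) =====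
-- stated objective: simpler
-- what changed: Replaces A's nested split-by-'/'-then-by-'-' branching, per-part truncation and re-joining with a single left-to-right pass over the characters that copies each separator and at most the first 4 characters of each segment.
import Mathlib
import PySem

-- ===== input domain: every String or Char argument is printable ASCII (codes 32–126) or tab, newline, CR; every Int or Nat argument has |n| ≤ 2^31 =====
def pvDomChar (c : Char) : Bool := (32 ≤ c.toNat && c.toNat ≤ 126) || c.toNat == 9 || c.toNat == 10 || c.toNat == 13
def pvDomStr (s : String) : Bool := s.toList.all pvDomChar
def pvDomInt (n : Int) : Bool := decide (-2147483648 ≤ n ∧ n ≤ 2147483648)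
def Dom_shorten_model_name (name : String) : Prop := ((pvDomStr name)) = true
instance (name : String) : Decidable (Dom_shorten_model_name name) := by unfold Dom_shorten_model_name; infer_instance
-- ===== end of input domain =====

-- B replaces A's nested split-by-'/'-then-'-' branching with one flat left-to-right pass
-- over the characters (objective: simpler; same return value everywhere).

-- ===== PORT A =====
-- subpart[:4] if len(subpart) > 4 else subpart
def pvTrunc (p : List Char) : List Char :=
  if 4 < PySem.Chars.len p then PySem.Chars.slice p none (some 4) else p

def shorten_model_name (name : String) : String :=
  let cs := name.toList
  if PySem.Chars.isIn ['/'] cs then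
    let parts := PySem.Chars.splitOn cs ['/']
    let shortened_parts := parts.foldl (fun acc part =>
      if PySem.Chars.isIn ['-'] part then
        acc ++ [PySem.Chars.join ['-'] ((PySem.Chars.splitOn part ['-']).map pvTrunc)]
      else acc ++ [pvTrunc part]) []
    String.ofList (PySem.Chars.join ['/'] shortened_parts)
  else if PySem.Chars.isIn ['-'] cs then
    String.ofList (PySem.Chars.join ['-'] ((PySem.Chars.splitOn cs ['-']).map pvTrunc))
  else String.ofList (pvTrunc cs)

-- ===== PORT B =====
def shorten_model_name_alt (name : String) : String :=
  let st := name.toList.foldl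
    (fun (st : List Char × Nat) ch =>
      if ch = '/' ∨ ch = '-' then (st.1 ++ [ch], 0)
      else if st.2 < 4 then (st.1 ++ [ch], st.2 + 1) else (st.1, st.2 + 1))
    ([], 0)
  String.ofList st.1

-- ===== PRECONDITION & SPEC =====
def Spec_shorten_model_name (name : String) (out : String) : Prop := out = shorten_model_name_alt name
instance (name : String) (out : String) : Decidable (Spec_shorten_model_name name out) := by unfold Spec_shorten_model_name; infer_instance

-- ===== CLAIM (what is proved, stated in full; the proofs are below) =====
def Claim_equal_shorten_model_name : Prop := ∀ (name : String), Dom_shorten_model_name name → Spec_shorten_model_name name (shorten_model_name name)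

-- ===== LEMMAS AND PROOFS =====

-- splitC l c = structural-recursive split of l at every occurrence of c
def splitC : List Char → Char → List (List Char)
  | [], _ => [[]]
  | x :: xs, c =>
    if x = c then [] :: splitC xs c
    else
      match splitC xs c with
      | [] => [[x]]
      | p :: ps => (x :: p) :: ps

-- goB: B's loop as a structural recursion (output part only)
def goB : List Char → Nat → List Char
  | [], _ => []
  | c :: rest, k =>
    if c = '/' ∨ c = '-' then c :: goB rest 0
    else if k < 4 then c :: goB rest (k + 1) else goB rest (k + 1)

theorem splitC_ne_nil (l : List Char) (c : Char) : splitC l c ≠ [] := by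
  induction l with
  | nil => simp [splitC]
  | cons x xs ih =>
    simp only [splitC]
    split
    · simp
    · cases h : splitC xs c <;> simp

theorem splitC_not_mem (l : List Char) (c : Char) (h : c ∉ l) : splitC l c = [l] := by
  induction l with
  | nil => rfl
  | cons x xs ih =>
    simp only [List.mem_cons, not_or] at h
    have hx : ¬ x = c := fun hx => h.1 hx.symm
    simp [splitC, hx, ih h.2]

theorem isIn_singleton_iff (c : Char) (l : List Char) :
    PySem.Chars.isIn [c] l = true ↔ c ∈ l := by
  rw [PySem.Chars.isIn_iff_infix]
  constructor
  · intro h; exact h.mem (by simp)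
  · intro h
    obtain ⟨pre, suf, rfl⟩ := List.mem_iff_append.mp h
    exact ⟨pre, suf, by simp⟩

theorem splitOn_go_eq (c : Char) (l cur : List Char) (acc : List (List Char))
    (fuel : Nat) (hf : l.length ≤ fuel) :
    PySem.Chars.splitOn.go [c] fuel l cur acc =
      acc.reverse ++
        (match splitC l c with
         | [] => []
         | p :: ps => (cur.reverse ++ p) :: ps) := by
  induction l generalizing cur acc fuel with
  | nil =>
    cases fuel <;> simp [PySem.Chars.splitOn.go, splitC]
  | cons x xs ih =>
    cases fuel with
    | zero => simp at hf
    | succ fuel =>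
      simp only [List.length_cons, Nat.succ_le_succ_iff] at hf
      by_cases hx : x = c
      · subst hx
        have hpre : List.isPrefixOf [x] (x :: xs) = true := by simp [List.isPrefixOf]
        simp only [PySem.Chars.splitOn.go, hpre, if_true, List.length_cons, List.length_nil,
          List.drop_succ_cons, List.drop_zero, Nat.zero_add]
        rw [ih _ _ _ hf]
        cases h : splitC xs x with
        | nil => exact absurd h (splitC_ne_nil _ _)
        | cons p ps => simp [splitC, h]
      · have hpre : List.isPrefixOf [c] (x :: xs) = false := by
          simp only [List.isPrefixOf, List.isPrefixOf_nil_left, Bool.and_true,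
            beq_eq_false_iff_ne, ne_eq]
          exact fun h => hx h.symm
        simp only [PySem.Chars.splitOn.go, hpre, Bool.false_eq_true, if_false]
        rw [ih _ _ _ hf]
        cases h : splitC xs c with
        | nil => exact absurd h (splitC_ne_nil _ _)
        | cons p ps => simp [splitC, if_neg hx, h]

theorem splitOn_eq_splitC (l : List Char) (c : Char) :
    PySem.Chars.splitOn l [c] = splitC l c := by
  show PySem.Chars.splitOn.go [c] (l.length + 1) l [] [] = _
  rw [splitOn_go_eq c l [] [] (l.length + 1) (by omega)]
  cases h : splitC l c with
  | nil => exact absurd h (splitC_ne_nil _ _)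
  | cons p ps => simp

theorem join_cons_append (a : Char) (x y : List Char) (ys : List (List Char)) :
    PySem.Chars.join [a] ((x ++ y) :: ys) = x ++ PySem.Chars.join [a] (y :: ys) := by
  cases ys with
  | nil => simp [PySem.Chars.join_singleton]
  | cons z zs =>
    rw [PySem.Chars.join_cons_cons, PySem.Chars.join_cons_cons]
    simp

theorem trunc_eq_take (p : List Char) : pvTrunc p = p.take 4 := by
  unfold pvTrunc
  split
  · rw [PySem.Chars.slice_eq_listSlice, PySem.List.slice_to (hb := by norm_num)]
    rfl
  · rename_i h
    rw [PySem.Chars.len_eq] at h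
    rw [List.take_of_length_le (by omega)]

theorem foldl_append_map {α β : Type} (g : α → β) (l : List α) (acc : List β) :
    List.foldl (fun a x => a ++ [g x]) acc l = acc ++ l.map g := by
  induction l generalizing acc with
  | nil => simp
  | cons x xs ih => simp [ih]

-- the common truncated form
def pvInner (p : List Char) : List Char :=
  PySem.Chars.join ['-'] ((splitC p '-').map (List.take 4))

def pvP (cs : List Char) : List Char :=
  PySem.Chars.join ['/'] ((splitC cs '/').map pvInner)

-- B's goB at state k, expressed through the split structure
def pvP' (cs : List Char) (k : Nat) : List Char :=
  PySem.Chars.join ['/']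
    (match splitC cs '/' with
     | [] => []
     | p :: ps =>
       (match splitC p '-' with
        | [] => []
        | q :: qs => PySem.Chars.join ['-'] (q.take (4 - k) :: qs.map (List.take 4))) :: ps.map pvInner)

theorem pvP'_zero (cs : List Char) : pvP' cs 0 = pvP cs := by
  unfold pvP' pvP
  cases h : splitC cs '/' with
  | nil => exact absurd h (splitC_ne_nil _ _)
  | cons p ps =>
    cases h2 : splitC p '-' with
    | nil => exact absurd h2 (splitC_ne_nil _ _)
    | cons q qs => simp [pvInner, h2]

theorem pvP'_slash (rest : List Char) (k : Nat) : pvP' ('/' :: rest) k = '/' :: pvP rest := by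
  unfold pvP' pvP
  simp only [splitC, if_pos rfl]
  cases h : splitC rest '/' with
  | nil => exact absurd h (splitC_ne_nil _ _)
  | cons p ps =>
    simp [splitC, PySem.Chars.join_cons_cons, PySem.Chars.join_singleton]

theorem pvP'_dash (rest : List Char) (k : Nat) : pvP' ('-' :: rest) k = '-' :: pvP rest := by
  unfold pvP' pvP
  have hnc : ¬ ('-' = '/') := by decide
  simp only [splitC, if_neg hnc]
  cases h : splitC rest '/' with
  | nil => exact absurd h (splitC_ne_nil _ _)
  | cons p ps =>
    cases h2 : splitC p '-' with
    | nil => exact absurd h2 (splitC_ne_nil _ _)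
    | cons q qs =>
      simp only [splitC, h2, if_true, List.map_cons]
      have e1 : PySem.Chars.join ['-'] (List.take (4 - k) [] :: List.take 4 q :: qs.map (List.take 4))
          = ['-'] ++ pvInner p := by
        rw [List.take_nil, PySem.Chars.join_cons_cons]
        unfold pvInner; rw [h2]; simp
      rw [e1, join_cons_append]
      simp [pvInner, h2]

theorem goB_eq (cs : List Char) (k : Nat) : goB cs k = pvP' cs k := by
  induction cs generalizing k with
  | nil => simp [goB, pvP', splitC, PySem.Chars.join_singleton]
  | cons c rest ih =>
    by_cases hs : c = '/' ∨ c = '-'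
    · rcases hs with h | h
      · subst h
        rw [goB, if_pos (Or.inl rfl), ih 0, pvP'_zero, pvP'_slash]
      · subst h
        rw [goB, if_pos (Or.inr rfl), ih 0, pvP'_zero, pvP'_dash]
    · push_neg at hs
      rw [goB, if_neg (by tauto), ih (k + 1)]
      unfold pvP'
      simp only [splitC, if_neg hs.1]
      cases h : splitC rest '/' with
      | nil => exact absurd h (splitC_ne_nil _ _)
      | cons p ps =>
        simp only
        cases h2 : splitC p '-' with
        | nil => exact absurd h2 (splitC_ne_nil _ _)
        | cons q qs =>
          simp only [splitC, if_neg hs.2, h2]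
          have htake : (c :: q).take (4 - k) = (if k < 4 then [c] else []) ++ q.take (4 - (k + 1)) := by
            by_cases hk : k < 4
            · have hv : 4 - k = (4 - (k + 1)) + 1 := by omega
              simp [hk, hv]
            · have hv1 : 4 - k = 0 := by omega
              have hv2 : 4 - (k + 1) = 0 := by omega
              simp [hk, hv1, hv2]
          rw [htake, join_cons_append, join_cons_append]
          split <;> simp

theorem foldlB_fst (cs : List Char) (out : List Char) (k : Nat) :
    (List.foldl
      (fun (st : List Char × Nat) ch =>
        if ch = '/' ∨ ch = '-' then (st.1 ++ [ch], 0)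
        else if st.2 < 4 then (st.1 ++ [ch], st.2 + 1) else (st.1, st.2 + 1))
      (out, k) cs).1 = out ++ goB cs k := by
  induction cs generalizing out k with
  | nil => simp [goB]
  | cons c rest ih =>
    by_cases hs : c = '/' ∨ c = '-'
    · simp [List.foldl_cons, goB, hs, ih]
    · by_cases hk : k < 4 <;> simp [List.foldl_cons, goB, hs, hk, ih]

theorem inner_eq (p : List Char) :
    (if PySem.Chars.isIn ['-'] p then
        PySem.Chars.join ['-'] ((PySem.Chars.splitOn p ['-']).map pvTrunc)
      else pvTrunc p) = pvInner p := by
  unfold pvInner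
  by_cases h : '-' ∈ p
  · rw [if_pos ((isIn_singleton_iff _ _).mpr h), splitOn_eq_splitC]
    congr 1
    exact List.map_congr_left (fun x _ => trunc_eq_take x)
  · rw [if_neg (by simp [isIn_singleton_iff, h]), splitC_not_mem _ _ h]
    simp [PySem.Chars.join_singleton, trunc_eq_take]

theorem A_eq (name : String) : shorten_model_name name = String.ofList (pvP name.toList) := by
  unfold shorten_model_name
  set cs := name.toList with hcs
  by_cases h1 : '/' ∈ cs
  · rw [if_pos ((isIn_singleton_iff _ _).mpr h1), splitOn_eq_splitC]
    unfold pvP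
    have hfun : ∀ (parts : List (List Char)),
        List.foldl (fun acc part =>
          if PySem.Chars.isIn ['-'] part = true then
            acc ++ [PySem.Chars.join ['-'] (List.map pvTrunc (PySem.Chars.splitOn part ['-']))]
          else acc ++ [pvTrunc part]) [] parts
        = parts.map pvInner := by
      intro parts
      have hb : (fun (acc : List (List Char)) part =>
          if PySem.Chars.isIn ['-'] part = true then
            acc ++ [PySem.Chars.join ['-'] (List.map pvTrunc (PySem.Chars.splitOn part ['-']))]
          else acc ++ [pvTrunc part])
          = (fun acc part => acc ++ [pvInner part]) := by
        funext acc part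
        rw [← inner_eq part]
        split <;> rfl
      rw [hb, foldl_append_map]
      simp
    simp only [hfun]
  · rw [if_neg (by simp [isIn_singleton_iff, h1])]
    have hsplit : splitC cs '/' = [cs] := splitC_not_mem _ _ h1
    unfold pvP
    rw [hsplit, List.map_singleton, PySem.Chars.join_singleton]
    by_cases h2 : '-' ∈ cs
    · rw [if_pos ((isIn_singleton_iff _ _).mpr h2), splitOn_eq_splitC]
      unfold pvInner
      congr 2
      exact List.map_congr_left (fun x _ => trunc_eq_take x)
    · rw [if_neg (by simp [isIn_singleton_iff, h2])]
      unfold pvInner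
      rw [splitC_not_mem _ _ h2]
      simp [PySem.Chars.join_singleton, trunc_eq_take]

theorem B_eq (name : String) : shorten_model_name_alt name = String.ofList (pvP name.toList) := by
  unfold shorten_model_name_alt
  simp only
  rw [foldlB_fst, goB_eq, pvP'_zero]
  simp

-- ===== VERDICT (by name: the statement is the Claim_ definition above) =====
theorem shorten_model_name_spec : Claim_equal_shorten_model_name := by
  intro name _
  unfold Spec_shorten_model_name
  rw [A_eq, B_eq]
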